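-- pv_equiv track=rewrite | github.com/mkXultra/mew | src/mew/implement_lane/native_tool_harness.py | _external_failure_assertion_segments
-- ===== SOURCE A (Python) =====
-- def _external_failure_assertion_segments(executable_terms: tuple[str, ...]) -> tuple[tuple[str, ...], ...]:
--     segments: list[tuple[str, ...]] = []
--     current: list[str] = []
--     for term in executable_terms:
--         if term == "&&":
--             if current:
--                 segments.append(tuple(current))
--                 current = []
--             continue
--         current.append(term)
--     if current:
--         segments.append(tuple(current))
--     return tuple(segments)
-- ===== SOURCE B (Python) =====
-- def _external_failure_assertion_segments(executable_terms: tuple[str, ...]) -> tuple[tuple[str, ...], ...]: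
--     segments: list[tuple[str, ...]] = []
--     i, n = 0, len(executable_terms)
--     while i < n:
--         if executable_terms[i] == "&&":
--             i += 1
--             continue
--         j = i
--         while j < n and executable_terms[j] != "&&":
--             j += 1
--         segments.append(executable_terms[i:j])
--         i = j
--     return tuple(segments)
-- ===== Notes on version B (the rewrite author's own statement) =====
-- stated objective: alternative
-- what changed: Replaces A's element-by-element buffer-and-flush accumulator with a two-pointer run scanner that skips delimiters and slices each maximal non-'&&' run out directly.
import Mathlib
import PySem

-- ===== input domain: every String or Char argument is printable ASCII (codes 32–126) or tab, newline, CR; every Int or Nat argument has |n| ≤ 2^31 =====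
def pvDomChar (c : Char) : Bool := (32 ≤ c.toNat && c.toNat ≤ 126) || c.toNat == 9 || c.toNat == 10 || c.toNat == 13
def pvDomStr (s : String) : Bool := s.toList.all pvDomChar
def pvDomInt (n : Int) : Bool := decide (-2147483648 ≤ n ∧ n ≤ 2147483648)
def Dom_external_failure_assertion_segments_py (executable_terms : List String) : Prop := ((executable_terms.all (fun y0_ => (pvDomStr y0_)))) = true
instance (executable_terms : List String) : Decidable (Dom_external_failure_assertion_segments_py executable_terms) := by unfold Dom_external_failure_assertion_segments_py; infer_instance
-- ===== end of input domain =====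

-- B replaces A's buffer-and-flush accumulator with a two-pointer run scanner
-- (skip delimiters, slice out each maximal non-'&&' run); objective: alternative.


-- ===== PORT A =====
-- one loop step of A: flush the buffer on '&&', otherwise extend it
def pvStepA (st : List (List String) × List String) (term : String) :
    List (List String) × List String :=
  if term = "&&" then
    (if st.2 = [] then st else (st.1 ++ [st.2], []))
  else
    (st.1, st.2 ++ [term])

def external_failure_assertion_segments_py (executable_terms : List String) : List (List String) :=
  let st := executable_terms.foldl pvStepA ([], [])
  if st.2 = [] then st.1 else st.1 ++ [st.2]

-- ===== PORT B =====
-- outer while loop of B: skip a '&&', or scan the maximal non-'&&' run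
-- (the inner 'while j < n and … != "&&"' scan and the slice [i:j] are takeWhile/dropWhile)
def pvScanB : List String → List (List String)
  | [] => []
  | x :: xs =>
    if x = "&&" then pvScanB xs
    else (x :: xs.takeWhile (· ≠ "&&")) :: pvScanB (xs.dropWhile (· ≠ "&&"))
termination_by ts => ts.length
decreasing_by
  · simp
  · exact Nat.lt_succ_of_le (xs.length_dropWhile_le _)

def external_failure_assertion_segments_py_alt (executable_terms : List String) : List (List String) :=
  pvScanB executable_terms

-- ===== PRECONDITION & SPEC =====
def Spec_external_failure_assertion_segments_py (executable_terms : List String) (out : List (List String)) : Prop := out = external_failure_assertion_segments_py_alt executable_terms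
instance (executable_terms : List String) (out : List (List String)) : Decidable (Spec_external_failure_assertion_segments_py executable_terms out) := by unfold Spec_external_failure_assertion_segments_py; infer_instance

-- ===== CLAIM (what is proved, stated in full; the proofs are below) =====
def Claim_equal_external_failure_assertion_segments_py : Prop := ∀ (executable_terms : List String), Dom_external_failure_assertion_segments_py executable_terms → Spec_external_failure_assertion_segments_py executable_terms (external_failure_assertion_segments_py executable_terms)

-- ===== LEMMAS AND PROOFS =====

-- A's fold from an arbitrary state (segs, cur), followed by the final flush,
-- equals segs ++ (cur merged into B's first run) ++ the rest of B's runs.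
theorem pvFoldA_eq (ts : List String) :
    ∀ (segs : List (List String)) (cur : List String),
      (let st := ts.foldl pvStepA (segs, cur)
       if st.2 = [] then st.1 else st.1 ++ [st.2]) =
      segs ++ (if cur = [] then pvScanB ts
               else (cur ++ ts.takeWhile (· ≠ "&&")) :: pvScanB (ts.dropWhile (· ≠ "&&"))) := by
  induction ts with
  | nil =>
    intro segs cur
    by_cases h : cur = [] <;> simp [h, pvScanB]
  | cons x xs ih =>
    intro segs cur
    by_cases hx : x = "&&"
    · by_cases hc : cur = []
      · have hstep : pvStepA (segs, cur) x = (segs, []) := by simp [pvStepA, hx, hc]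
        rw [List.foldl_cons, hstep, ih segs []]
        simp [pvScanB, hx, hc]
      · have hstep : pvStepA (segs, cur) x = (segs ++ [cur], []) := by simp [pvStepA, hx, hc]
        rw [List.foldl_cons, hstep, ih (segs ++ [cur]) []]
        simp [hc, List.takeWhile, List.dropWhile, hx, pvScanB]
    · have hstep : pvStepA (segs, cur) x = (segs, cur ++ [x]) := by simp [pvStepA, hx]
      rw [List.foldl_cons, hstep, ih segs (cur ++ [x])]
      by_cases hc : cur = [] <;>
        simp [hc, List.takeWhile, List.dropWhile, hx, pvScanB]

-- ===== VERDICT (by name: the statement is the Claim_ definition above) =====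
theorem external_failure_assertion_segments_py_spec : Claim_equal_external_failure_assertion_segments_py := by
  intro ts _
  show _ = _
  have h := pvFoldA_eq ts [] []
  simpa [external_failure_assertion_segments_py,
    external_failure_assertion_segments_py_alt] using h
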